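-- pv_equiv track=rewrite | github.com/hugolin615/ELE420520Spring2023 | Project2/util.py | index_to_relay
-- ===== SOURCE A (Python) =====
-- def index_to_relay(index):
--     relay_assignment = {1: [11, 12, 13, 14, 21, 22, 23, 24], \
--                    2: [31, 32, 33, 34, 41, 42, 43, 44], \
--                    3: [51, 52, 53, 54, 61, 62, 63, 64], \
--                    4: [71, 72, 73, 74, 81, 82, 83, 84, 91, 92, 93, 94]}
--     relay_num = 0
--     for k in relay_assignment.keys():
--         if index in relay_assignment[k]:
--             relay_num = k
--             break
--
--     assert(relay_num != 0)
--     return relay_num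
-- ===== SOURCE B (Python) =====
-- def index_to_relay(index):
--     # Relay codes are two-digit numbers 10*t + u with tens t in 1..9 and units u in 1..4;
--     # groups pair up consecutive tens digits (group 4 takes tens 7..9).
--     t, u = divmod(index, 10)
--     assert 1 <= t <= 9 and 1 <= u <= 4
--     return min((t + 1) // 2, 4)
-- ===== Notes on version B (the rewrite author's own statement) =====
-- stated objective: alternative
-- what changed: Drops the table entirely: B decodes the relay number arithmetically (divmod by 10) and computes the group as min((tens+1)//2, 4), instead of scanning group lists for membership; Pre_ excludes indices outside every group, where both raise AssertionError.
-- outside the precondition, e.g. on index_to_relay(2): A raises AssertionError, B raises AssertionError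
import Mathlib
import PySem

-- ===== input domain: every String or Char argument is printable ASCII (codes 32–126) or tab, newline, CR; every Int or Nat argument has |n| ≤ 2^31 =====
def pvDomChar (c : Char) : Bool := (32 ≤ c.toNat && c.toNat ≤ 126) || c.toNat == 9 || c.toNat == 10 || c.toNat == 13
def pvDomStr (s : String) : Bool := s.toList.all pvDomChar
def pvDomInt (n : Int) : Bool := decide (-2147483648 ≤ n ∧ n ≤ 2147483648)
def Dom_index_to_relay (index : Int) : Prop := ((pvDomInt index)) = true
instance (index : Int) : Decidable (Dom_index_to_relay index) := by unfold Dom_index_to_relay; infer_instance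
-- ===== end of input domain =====

-- B replaces A's table scan by closed-form digit arithmetic (alternative decomposition).
-- Pre_ excludes indices in no group, where both Pythons raise AssertionError.

-- ===== PORT A =====
-- A's dict {group : relay list}
def relayAssignment : PySem.Dict Int (List Int) :=
  PySem.Dict.ofList
    [(1, [11, 12, 13, 14, 21, 22, 23, 24]),
     (2, [31, 32, 33, 34, 41, 42, 43, 44]),
     (3, [51, 52, 53, 54, 61, 62, 63, 64]),
     (4, [71, 72, 73, 74, 81, 82, 83, 84, 91, 92, 93, 94])]

-- A's 'for k in keys: if index in relay_assignment[k]: relay_num = k; break'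
def relayScan (index : Int) : List Int → Int
  | [] => 0
  | k :: ks => if (relayAssignment.getD k []).contains index then k else relayScan index ks

def index_to_relay (index : Int) : Int :=
  relayScan index relayAssignment.keys

-- ===== PORT B =====
-- B's 't, u = divmod(index, 10)' then 'min((t + 1) // 2, 4)' (Python's floor divmod)
def index_to_relay_alt (index : Int) : Int :=
  let t := PySem.Int.floordiv index 10
  min (PySem.Int.floordiv (t + 1) 2) 4

-- ===== PRECONDITION & SPEC =====
-- Pre_ excludes exactly the indices outside every group, on which A (and B) raises AssertionError.
def Pre_index_to_relay (index : Int) : Prop :=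
  index ∈ ([11, 12, 13, 14, 21, 22, 23, 24, 31, 32, 33, 34, 41, 42, 43, 44,
            51, 52, 53, 54, 61, 62, 63, 64,
            71, 72, 73, 74, 81, 82, 83, 84, 91, 92, 93, 94] : List Int)
instance (index : Int) : Decidable (Pre_index_to_relay index) := by unfold Pre_index_to_relay; infer_instance

def pvWitness_index_to_relay : Int := (42)

def Spec_index_to_relay (index : Int) (out : Int) : Prop := out = index_to_relay_alt index
instance (index : Int) (out : Int) : Decidable (Spec_index_to_relay index out) := by unfold Spec_index_to_relay; infer_instance

-- ===== CLAIM (what is proved, stated in full; the proofs are below) =====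
def Claim_equal_index_to_relay : Prop := ∀ (index : Int), Dom_index_to_relay index → Pre_index_to_relay index → Spec_index_to_relay index (index_to_relay index)

-- ===== LEMMAS AND PROOFS =====

-- ===== VERDICT (by name: the statement is the Claim_ definition above) =====
theorem index_to_relay_spec : Claim_equal_index_to_relay := by
  intro index _ hpre
  unfold Pre_index_to_relay at hpre
  unfold Spec_index_to_relay
  fin_cases hpre <;> decide
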